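-- pv_equiv track=rewrite | github.com/marcioclaudio268-code/PROJETO-DP | src/dashboard/report_importer.py | _next_data_row
-- ===== SOURCE A (Python) =====
-- def _next_data_row(rows: list[list[str]], current_row: list[str]) -> list[str] | None:
--     try:
--         index = rows.index(current_row)
--     except ValueError:
--         return None
--     for candidate in rows[index + 1 :]:
--         if any(candidate):
--             return candidate
--     return None
-- ===== SOURCE B (Python) =====
-- def _next_data_row(rows: list[list[str]], current_row: list[str]) -> list[str] | None:
--     ans = None
--     nxt = None  # nearest non-empty row strictly to the right of the position being scanned
--     for r in reversed(rows):
--         if r == current_row: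
--             ans = nxt
--         if any(r):
--             nxt = r
--     return ans
-- ===== Notes on version B (the rewrite author's own statement) =====
-- stated objective: alternative
-- what changed: Instead of locating current_row with rows.index and then scanning a forward suffix slice, B makes one backward pass over reversed(rows), maintaining the nearest non-empty row to the right and recording it each time a row equals current_row (the leftmost match is processed last, so it wins).
import Mathlib
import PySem

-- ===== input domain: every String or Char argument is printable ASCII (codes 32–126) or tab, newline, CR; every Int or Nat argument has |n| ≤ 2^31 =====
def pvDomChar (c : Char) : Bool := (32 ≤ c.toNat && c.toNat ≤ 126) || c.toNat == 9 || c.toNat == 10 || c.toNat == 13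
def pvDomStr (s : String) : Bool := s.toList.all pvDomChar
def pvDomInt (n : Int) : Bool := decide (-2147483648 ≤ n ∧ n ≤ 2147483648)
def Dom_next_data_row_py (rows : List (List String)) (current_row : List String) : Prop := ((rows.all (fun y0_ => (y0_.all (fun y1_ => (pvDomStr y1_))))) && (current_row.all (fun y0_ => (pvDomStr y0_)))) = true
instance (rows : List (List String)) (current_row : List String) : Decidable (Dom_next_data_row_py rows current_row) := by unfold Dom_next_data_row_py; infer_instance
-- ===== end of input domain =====

-- B replaces A's locate-then-forward-scan (rows.index + suffix slice loop) by one backward pass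
-- over reversed(rows) with two accumulators; alternative decomposition, same O(n) cost.

-- ===== PORT A =====
-- the `for candidate in rows[index+1:]` loop; `any(candidate)` is "some cell is a non-empty string"
def aScan : List (List String) → Option (List String)
  | [] => none
  | candidate :: rest => if candidate.any (· != "") then some candidate else aScan rest

def next_data_row_py (rows : List (List String)) (current_row : List String) : Option (List String) :=
  match PySem.List.index? rows current_row with
  | none => none                    -- except ValueError: return None
  | some index => aScan (PySem.List.slice rows (some ((index : Int) + 1)) none)

-- ===== PORT B =====
-- Source B's single loop `for r in reversed(rows)` carrying (ans, nxt)
def bStep (current_row : List String) (st : Option (List String) × Option (List String))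
    (r : List String) : Option (List String) × Option (List String) :=
  ((if r = current_row then st.2 else st.1),
   (if r.any (· != "") then some r else st.2))

def next_data_row_py_alt (rows : List (List String)) (current_row : List String) : Option (List String) :=
  (rows.reverse.foldl (bStep current_row) (none, none)).1

-- ===== PRECONDITION & SPEC =====
def Spec_next_data_row_py (rows : List (List String)) (current_row : List String) (out : Option (List String)) : Prop := out = next_data_row_py_alt rows current_row
instance (rows : List (List String)) (current_row : List String) (out : Option (List String)) : Decidable (Spec_next_data_row_py rows current_row out) := by unfold Spec_next_data_row_py; infer_instance

-- ===== CLAIM (what is proved, stated in full; the proofs are below) =====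
def Claim_equal_next_data_row_py : Prop := ∀ (rows : List (List String)) (current_row : List String), Dom_next_data_row_py rows current_row → Spec_next_data_row_py rows current_row (next_data_row_py rows current_row)

-- ===== LEMMAS AND PROOFS =====
theorem bStep_fst (cur : List String) (st : Option (List String) × Option (List String))
    (r : List String) :
    (bStep cur st r).1 = if r = cur then st.2 else st.1 := rfl

theorem bStep_snd (cur : List String) (st : Option (List String) × Option (List String))
    (r : List String) :
    (bStep cur st r).2 = if r.any (· != "") then some r else st.2 := rfl

-- foldl over the reverse is the right fold of bStep's flip
theorem alt_as_foldr (rows : List (List String)) (cur : List String) :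
    rows.reverse.foldl (bStep cur) (none, none)
      = rows.foldr (fun r st => bStep cur st r) (none, none) := by
  rw [List.foldl_reverse]

-- the second accumulator is exactly A's forward scan of the same list
theorem snd_eq_aScan (cur : List String) (l : List (List String)) :
    (l.foldr (fun r st => bStep cur st r) (none, none)).2 = aScan l := by
  induction l with
  | nil => rfl
  | cons c rest ih =>
    rw [List.foldr_cons, bStep_snd, ih, aScan]

theorem A_unfold_some (rows : List (List String)) (cur : List String) (k : Nat)
    (h : PySem.List.index? rows cur = some k) :
    next_data_row_py rows cur = aScan (PySem.List.slice rows (some ((k : Int) + 1)) none) := by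
  unfold next_data_row_py; rw [h]

theorem A_unfold_none (rows : List (List String)) (cur : List String)
    (h : PySem.List.index? rows cur = none) :
    next_data_row_py rows cur = none := by
  unfold next_data_row_py; rw [h]

theorem drop_succ_of_slice (k : Nat) (xs : List (List String)) :
    PySem.List.slice xs (some ((k : Int) + 1)) none = xs.drop (k + 1) := by
  rw [show ((k : Int) + 1) = ((k + 1 : Nat) : Int) by push_cast; ring,
      PySem.List.slice_from_natCast]

theorem next_eq (rows : List (List String)) (current_row : List String) :
    next_data_row_py rows current_row = next_data_row_py_alt rows current_row := by
  induction rows with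
  | nil => rfl
  | cons r rest ih =>
    unfold next_data_row_py_alt
    rw [alt_as_foldr, List.foldr_cons, bStep_fst]
    by_cases h : r = current_row
    · rw [if_pos h, snd_eq_aScan]
      subst h
      rw [A_unfold_some (r :: rest) r 0 (PySem.List.index?_cons_self r rest),
          drop_succ_of_slice]
      rfl
    · rw [if_neg h]
      have hrest : (rest.foldr (fun r st => bStep current_row st r) (none, none)).1
          = next_data_row_py rest current_row := by
        rw [ih]; unfold next_data_row_py_alt; rw [alt_as_foldr]
      rw [hrest]
      have hidx := PySem.List.index?_cons_of_ne (x := r) (xs := rest) (v := current_row) h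
      cases hk : PySem.List.index? rest current_row with
      | none =>
        rw [A_unfold_none (r :: rest) current_row (by rw [hidx, hk]; rfl),
            A_unfold_none rest current_row hk]
      | some k =>
        rw [A_unfold_some (r :: rest) current_row (k + 1) (by rw [hidx, hk]; rfl),
            drop_succ_of_slice,
            A_unfold_some rest current_row k hk, drop_succ_of_slice,
            List.drop_succ_cons]

-- ===== VERDICT (by name: the statement is the Claim_ definition above) =====
theorem next_data_row_py_spec : Claim_equal_next_data_row_py := by
  intro rows cur _
  unfold Spec_next_data_row_py
  exact next_eq rows cur
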